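-- pv_equiv track=rewrite | github.com/ZengEno/ai-md-editor-backend | routers/id_utils.py | twenty_six_to_decimal
-- ===== SOURCE A (Python) =====
-- def twenty_six_to_decimal(twenty_six_num):
--     """将用大写英文字母表示的26进制数转换为十进制数"""
--     result = 0
--     power = 0
--     for char in twenty_six_num[::-1]:  # 从低位到高位处理
--         digit = ord(char) - ord('A')
--         result += digit * (26 ** power)
--         power += 1
--     return result
-- ===== SOURCE B (Python) =====
-- def twenty_six_to_decimal(twenty_six_num):
--     """将用大写英文字母表示的26进制数转换为十进制数"""
--     result = 0
--     for char in twenty_six_num:  # Horner: forward pass, no power variable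
--         result = result * 26 + (ord(char) - ord('A'))
--     return result
-- ===== Notes on version B (the rewrite author's own statement) =====
-- stated objective: faster
-- what changed: Replaces the reversed traversal with a power counter and 26**power exponentiation by a forward Horner fold result = result*26 + digit, dropping the power variable entirely.
import Mathlib
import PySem

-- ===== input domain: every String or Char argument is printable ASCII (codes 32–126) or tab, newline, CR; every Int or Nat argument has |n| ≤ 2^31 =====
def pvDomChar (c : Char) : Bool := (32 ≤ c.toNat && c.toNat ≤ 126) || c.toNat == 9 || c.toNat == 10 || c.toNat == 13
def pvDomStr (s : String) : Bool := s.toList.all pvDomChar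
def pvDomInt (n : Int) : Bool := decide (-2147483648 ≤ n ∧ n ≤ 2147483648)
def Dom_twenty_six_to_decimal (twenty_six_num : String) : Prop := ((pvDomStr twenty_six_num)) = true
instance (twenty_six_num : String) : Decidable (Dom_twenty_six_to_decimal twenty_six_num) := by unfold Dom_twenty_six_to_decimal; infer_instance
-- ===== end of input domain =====

-- B: forward Horner fold (result = result*26 + digit), dropping A's reversed traversal and power variable; same values, simpler.

-- ===== PORT A =====
-- A's loop over twenty_six_num[::-1] with state (result, power); power only counts up, kept as Nat.
def pvALoop : List Char → Int × Nat → Int × Nat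
  | [], st => st
  | c :: t, (result, power) =>
      pvALoop t (result + (Int.ofNat c.toNat - Int.ofNat 'A'.toNat) * (26 : Int) ^ power, power + 1)

def twenty_six_to_decimal (twenty_six_num : String) : Int :=
  (pvALoop twenty_six_num.toList.reverse (0, 0)).1  -- [::-1] = reverse

-- ===== PORT B =====
def twenty_six_to_decimal_alt (twenty_six_num : String) : Int :=
  twenty_six_num.toList.foldl (fun result c => result * 26 + (Int.ofNat c.toNat - Int.ofNat 'A'.toNat)) 0

-- ===== PRECONDITION & SPEC =====
def Spec_twenty_six_to_decimal (twenty_six_num : String) (out : Int) : Prop := out = twenty_six_to_decimal_alt twenty_six_num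
instance (twenty_six_num : String) (out : Int) : Decidable (Spec_twenty_six_to_decimal twenty_six_num out) := by unfold Spec_twenty_six_to_decimal; infer_instance

-- ===== CLAIM (what is proved, stated in full; the proofs are below) =====
def Claim_equal_twenty_six_to_decimal : Prop := ∀ (twenty_six_num : String), Dom_twenty_six_to_decimal twenty_six_num → Spec_twenty_six_to_decimal twenty_six_num (twenty_six_to_decimal twenty_six_num)

-- ===== LEMMAS AND PROOFS =====

-- little-endian value of a digit list
def pvValLE : List Char → Int
  | [] => 0
  | c :: t => (Int.ofNat c.toNat - Int.ofNat 'A'.toNat) + 26 * pvValLE t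

theorem pvALoop_val (xs : List Char) : ∀ (r : Int) (p : Nat),
    (pvALoop xs (r, p)).1 = r + (26 : Int) ^ p * pvValLE xs := by
  induction xs with
  | nil => intro r p; simp [pvALoop, pvValLE]
  | cons c t ih =>
      intro r p
      simp only [pvALoop, pvValLE, ih]
      ring

theorem pvValLE_append (xs : List Char) (c : Char) :
    pvValLE (xs ++ [c]) = pvValLE xs + (26 : Int) ^ xs.length * (Int.ofNat c.toNat - Int.ofNat 'A'.toNat) := by
  induction xs with
  | nil => simp [pvValLE]
  | cons d t ih => simp [pvValLE, ih, List.length_cons]; ring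

theorem pvHorner_val (xs : List Char) : ∀ (r : Int),
    xs.foldl (fun result c => result * 26 + (Int.ofNat c.toNat - Int.ofNat 'A'.toNat)) r
      = r * (26 : Int) ^ xs.length + pvValLE xs.reverse := by
  induction xs with
  | nil => intro r; simp [pvValLE]
  | cons c t ih =>
      intro r
      simp only [List.foldl, ih, List.reverse_cons, pvValLE_append, List.length_reverse, List.length_cons]
      ring

-- ===== VERDICT (by name: the statement is the Claim_ definition above) =====
theorem twenty_six_to_decimal_spec : Claim_equal_twenty_six_to_decimal := by
  intro s _
  unfold Spec_twenty_six_to_decimal twenty_six_to_decimal twenty_six_to_decimal_alt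
  rw [pvALoop_val, pvHorner_val]
  simp
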